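-- pv_equiv track=rewrite | github.com/Ricardo232/IS2-Grupo-F-Entregable-5 | IngenieriaSoftwareII-desarrollo/keyhandler.py | check_keyorder
-- ===== SOURCE A (Python) =====
-- def check_keyorder(key1, key2):
--     move_key_combinations = ("downleft", "upleft", "upright", "downright")
--     first_key = key1
--     second_key = key2
--     for value in move_key_combinations:
--         if (first_key + second_key) == value:
--             return first_key + second_key
--         elif (second_key + first_key) == value:
--             return second_key + first_key
--
--     return first_key
-- ===== SOURCE B (Python) =====
-- def check_keyorder(key1, key2):
--     verticals = {"up", "down"}
--     horizontals = {"left", "right"}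
--     if key1 in verticals and key2 in horizontals:
--         return key1 + key2
--     if key1 in horizontals and key2 in verticals:
--         return key2 + key1
--     return key1
-- ===== Notes on version B (the rewrite author's own statement) =====
-- stated objective: simpler
-- what changed: B classifies each key by axis (vertical/horizontal sets) and composes the diagonal directly, replacing A's scan of a tuple of concatenated combination strings with two membership tests.
-- intended difference: On inputs where a concatenation of the two keys accidentally spells a valid combination without both keys being real axis keys (e.g. ('downl','eft'), or key1='' with key2 a full combo), A returns that fabricated combination string while B returns key1; B is intended because only genuine direction keys should form a diagonal. — e.g. on check_keyorder("downl", "eft"): A returns "downleft", B returns "downl"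
import Mathlib
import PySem

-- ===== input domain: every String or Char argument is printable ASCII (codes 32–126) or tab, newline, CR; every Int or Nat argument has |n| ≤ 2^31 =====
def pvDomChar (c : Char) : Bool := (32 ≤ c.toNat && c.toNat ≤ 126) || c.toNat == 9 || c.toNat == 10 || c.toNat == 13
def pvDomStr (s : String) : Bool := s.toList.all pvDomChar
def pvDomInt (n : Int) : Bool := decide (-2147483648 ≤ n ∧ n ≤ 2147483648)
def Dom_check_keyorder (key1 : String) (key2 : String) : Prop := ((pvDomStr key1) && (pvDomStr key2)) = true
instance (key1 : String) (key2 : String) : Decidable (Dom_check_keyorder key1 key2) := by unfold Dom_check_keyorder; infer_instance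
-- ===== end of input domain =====

-- B composes the diagonal from each key's axis (vertical/horizontal sets) instead of scanning
-- a tuple of concatenated combination strings (objective: simpler); on degenerate splits that
-- accidentally spell a combination (D_ below) B returns key1 instead of the fabricated combo.


-- ===== PORT A =====
-- loop over the tuple of valid combinations: forward match, then reversed match, else next
def koLoop (key1 : String) (key2 : String) : List String → String
  | [] => key1
  | v :: rest =>
      if key1 ++ key2 = v then key1 ++ key2
      else if key2 ++ key1 = v then key2 ++ key1
      else koLoop key1 key2 rest

def check_keyorder (key1 : String) (key2 : String) : String :=
  koLoop key1 key2 ["downleft", "upleft", "upright", "downright"]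

-- ===== PORT B =====
def check_keyorder_alt (key1 : String) (key2 : String) : String :=
  if key1 ∈ (["up", "down"] : List String) ∧ key2 ∈ (["left", "right"] : List String) then
    key1 ++ key2
  else if key1 ∈ (["left", "right"] : List String) ∧ key2 ∈ (["up", "down"] : List String) then
    key2 ++ key1
  else key1

-- ===== PRECONDITION & SPEC =====
-- On inputs where a concatenation of the two keys accidentally spells a valid combination
-- without both keys being genuine axis keys, A returns that fabricated combination string
-- while B returns key1; B's value is intended since only real direction keys form a diagonal.
def D_check_keyorder (key1 : String) (key2 : String) : Prop :=
  (key1 ++ key2 = "downleft" ∨ key1 ++ key2 = "upleft" ∨ key1 ++ key2 = "upright" ∨ key1 ++ key2 = "downright" ∨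
   key2 ++ key1 = "downleft" ∨ key2 ++ key1 = "upleft" ∨ key2 ++ key1 = "upright" ∨ key2 ++ key1 = "downright") ∧
  ¬ (((key1 = "up" ∨ key1 = "down") ∧ (key2 = "left" ∨ key2 = "right")) ∨
     ((key1 = "left" ∨ key1 = "right") ∧ (key2 = "up" ∨ key2 = "down"))) ∧
  key2 ≠ ""
instance (key1 : String) (key2 : String) : Decidable (D_check_keyorder key1 key2) := by
  unfold D_check_keyorder; infer_instance

def Spec_check_keyorder (key1 : String) (key2 : String) (out : String) : Prop :=
  ¬ D_check_keyorder key1 key2 → out = check_keyorder_alt key1 key2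
instance (key1 : String) (key2 : String) (out : String) : Decidable (Spec_check_keyorder key1 key2 out) := by
  unfold Spec_check_keyorder; infer_instance

def pvDiffWitness_check_keyorder : String × String := ("downl", "eft")
def pvDiffWitnessOut_check_keyorder : String × String := ("downleft", "downl")

-- ===== CLAIM (what is proved, stated in full; the proofs are below) =====
def Claim_unchanged_check_keyorder : Prop := ∀ (key1 : String) (key2 : String), Dom_check_keyorder key1 key2 → Spec_check_keyorder key1 key2 (check_keyorder key1 key2)
def Claim_changed_check_keyorder : Prop := Dom_check_keyorder (pvDiffWitness_check_keyorder.1) (pvDiffWitness_check_keyorder.2) ∧ D_check_keyorder (pvDiffWitness_check_keyorder.1) (pvDiffWitness_check_keyorder.2) ∧ check_keyorder (pvDiffWitness_check_keyorder.1) (pvDiffWitness_check_keyorder.2) = pvDiffWitnessOut_check_keyorder.1 ∧ check_keyorder_alt (pvDiffWitness_check_keyorder.1) (pvDiffWitness_check_keyorder.2) = pvDiffWitnessOut_check_keyorder.2 ∧ pvDiffWitnessOut_check_keyorder.1 ≠ pvDiffWitnessOut_check_keyorder.2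
def Claim_exact_check_keyorder : Prop := ∀ (key1 : String) (key2 : String), Dom_check_keyorder key1 key2 → D_check_keyorder key1 key2 → check_keyorder key1 key2 ≠ check_keyorder_alt key1 key2

-- ===== LEMMAS AND PROOFS =====

-- a concatenation with a nonempty right part is longer than its left part
theorem pv_append_ne_left (a b : String) (hb : b ≠ "") : a ++ b ≠ a := by
  intro h
  have := congrArg String.length h
  rw [String.length_append] at this
  have hb' : 0 < b.length := by
    rcases Nat.eq_zero_or_pos b.length with h0 | h0
    · exact absurd (String.length_eq_zero_iff.mp h0) hb
    · exact h0
  omega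

theorem pv_append_ne_right (a b : String) (hb : b ≠ "") : b ++ a ≠ a := by
  intro h
  have := congrArg String.length h
  rw [String.length_append] at this
  have hb' : 0 < b.length := by
    rcases Nat.eq_zero_or_pos b.length with h0 | h0
    · exact absurd (String.length_eq_zero_iff.mp h0) hb
    · exact h0
  omega

-- when the keys are not a genuine vertical/horizontal pair, B returns key1
theorem pv_alt_no_pair (key1 key2 : String)
    (h : ¬ (((key1 = "up" ∨ key1 = "down") ∧ (key2 = "left" ∨ key2 = "right")) ∨
            ((key1 = "left" ∨ key1 = "right") ∧ (key2 = "up" ∨ key2 = "down")))) :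
    check_keyorder_alt key1 key2 = key1 := by
  unfold check_keyorder_alt
  simp only [List.mem_cons, List.not_mem_nil, or_false]
  split_ifs with h1 h2
  · exact absurd (Or.inl h1) h
  · exact absurd (Or.inr h2) h
  · rfl

-- ===== VERDICT (by name: the statement is the Claim_ definition above) =====
theorem check_keyorder_spec : Claim_unchanged_check_keyorder := by
  intro key1 key2 _ hD
  by_cases hP : (((key1 = "up" ∨ key1 = "down") ∧ (key2 = "left" ∨ key2 = "right")) ∨
                 ((key1 = "left" ∨ key1 = "right") ∧ (key2 = "up" ∨ key2 = "down")))
  · rcases hP with ⟨h1 | h1, h2 | h2⟩ | ⟨h1 | h1, h2 | h2⟩ <;> subst h1 <;> subst h2 <;> rfl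
  · rw [pv_alt_no_pair _ _ hP]
    by_cases hk2 : key2 = ""
    · subst hk2
      simp only [check_keyorder, koLoop, String.append_empty, String.empty_append]
      split_ifs <;> rfl
    · have hM : ¬ (key1 ++ key2 = "downleft" ∨ key1 ++ key2 = "upleft" ∨ key1 ++ key2 = "upright" ∨ key1 ++ key2 = "downright" ∨
          key2 ++ key1 = "downleft" ∨ key2 ++ key1 = "upleft" ∨ key2 ++ key1 = "upright" ∨ key2 ++ key1 = "downright") :=
        fun hm => hD ⟨hm, hP, hk2⟩
      simp only [check_keyorder, koLoop]
      split_ifs with h1 h2 h3 h4 h5 h6 h7 h8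
      · exact absurd (Or.inl h1) hM
      · exact absurd (Or.inr (Or.inr (Or.inr (Or.inr (Or.inl h2))))) hM
      · exact absurd (Or.inr (Or.inl h3)) hM
      · exact absurd (Or.inr (Or.inr (Or.inr (Or.inr (Or.inr (Or.inl h4)))))) hM
      · exact absurd (Or.inr (Or.inr (Or.inl h5))) hM
      · exact absurd (Or.inr (Or.inr (Or.inr (Or.inr (Or.inr (Or.inr (Or.inl h6))))))) hM
      · exact absurd (Or.inr (Or.inr (Or.inr (Or.inl h7)))) hM
      · exact absurd (Or.inr (Or.inr (Or.inr (Or.inr (Or.inr (Or.inr (Or.inr h8))))))) hM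
      · rfl

theorem check_keyorder_changed : Claim_changed_check_keyorder := by
  unfold Claim_changed_check_keyorder; decide

theorem check_keyorder_tight : Claim_exact_check_keyorder := by
  intro key1 key2 _ hd
  unfold D_check_keyorder at hd
  obtain ⟨hm, hP, hk2⟩ := hd
  rw [pv_alt_no_pair _ _ hP]
  simp only [check_keyorder, koLoop]
  split_ifs with h1 h2 h3 h4 h5 h6 h7 h8
  · exact pv_append_ne_left key1 key2 hk2
  · exact pv_append_ne_right key1 key2 hk2
  · exact pv_append_ne_left key1 key2 hk2
  · exact pv_append_ne_right key1 key2 hk2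
  · exact pv_append_ne_left key1 key2 hk2
  · exact pv_append_ne_right key1 key2 hk2
  · exact pv_append_ne_left key1 key2 hk2
  · exact pv_append_ne_right key1 key2 hk2
  · exact absurd hm (by
      intro hm
      rcases hm with h | h | h | h | h | h | h | h
      · exact h1 h
      · exact h3 h
      · exact h5 h
      · exact h7 h
      · exact h2 h
      · exact h4 h
      · exact h6 h
      · exact h8 h)
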